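-- pv_equiv track=rewrite | github.com/FlorisE/algorithms | TapeEqui.py | solution
-- ===== SOURCE A (Python) =====
-- def solution(A):
--     left = 0
--     right = sum(A)
--     N = len(A)
--     minDiff = 100000
--     for i in range(0,N-1):
--         left += A[i]
--         right -= A[i]
--         summed = abs(left-right)
--         if summed < minDiff:
--             minDiff = summed
--     return minDiff
-- ===== SOURCE B (Python) =====
-- def _bisect_left(a, v):
--     # first index i with a[i] >= v in the sorted list a (hand-rolled binary search)
--     lo, hi = 0, len(a)
--     while lo < hi:
--         mid = (lo + hi) // 2
--         if a[mid] < v: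
--             lo = mid + 1
--         else:
--             hi = mid
--     return lo
--
-- def solution(A):
--     # Sort the prefix sums of A[:-1], then binary-search for the value closest to
--     # total/2: the minimal |left-right| is attained at one of the two neighbours
--     # of the insertion point of ceil(total/2).
--     total = sum(A)
--     prefixes = []
--     s = 0
--     for x in A[:-1]:
--         s += x
--         prefixes.append(s)
--     prefixes.sort()
--     target = (total + 1) // 2          # smallest integer p with 2*p >= total
--     i = _bisect_left(prefixes, target)
--     best = 100000
--     if i > 0:
--         best = min(best, total - 2 * prefixes[i - 1])
--     if i < len(prefixes):
--         best = min(best, 2 * prefixes[i] - total)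
--     return best
-- ===== Notes on version B (the rewrite author's own statement) =====
-- stated objective: alternative
-- what changed: B sorts the prefix sums of A[:-1] and binary-searches for the insertion point of ceil(total/2), taking the best of the two neighbours, instead of A's linear scan tracking the running minimum of |left-right|.
import Mathlib
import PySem

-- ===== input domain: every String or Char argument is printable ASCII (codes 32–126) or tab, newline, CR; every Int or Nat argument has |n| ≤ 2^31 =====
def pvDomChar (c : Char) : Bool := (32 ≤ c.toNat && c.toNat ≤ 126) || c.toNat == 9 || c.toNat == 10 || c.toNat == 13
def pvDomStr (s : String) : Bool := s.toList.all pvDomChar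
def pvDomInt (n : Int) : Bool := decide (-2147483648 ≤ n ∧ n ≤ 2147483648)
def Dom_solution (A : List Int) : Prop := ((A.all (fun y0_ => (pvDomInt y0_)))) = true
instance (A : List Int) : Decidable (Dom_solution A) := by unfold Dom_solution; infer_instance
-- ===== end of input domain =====

-- B sorts the prefix sums of A[:-1] and binary-searches for the entry closest to total/2,
-- instead of A's linear scan of the running left/right sums (alternative algorithm).

-- ===== PORT A =====
-- literal port of A: single loop over range(0, N-1) updating (left, right, minDiff)
def solution (A : List Int) : Int :=
  let left : Int := 0
  let right : Int := A.sum
  let N : Int := A.length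
  let minDiff : Int := 100000
  let st :=
    (PySem.List.pyRange 0 (N - 1) 1).foldl
      (fun (st : Int × Int × Int) (i : Int) =>
        let a := PySem.List.pyGetD A i 0
        let left := st.1 + a
        let right := st.2.1 - a
        let summed := |left - right|
        (left, right, if summed < st.2.2 then summed else st.2.2))
      (left, right, minDiff)
  st.2.2

-- ===== PORT B =====
-- port of Source B's hand-written `_bisect_left` while-loop (the loop becomes the
-- obvious recursion on the shrinking interval [lo, hi))
def bisectLeftLoop (a : List Int) (v lo hi : Int) : Int :=
  if h : lo < hi then
    let mid := PySem.Int.floordiv (lo + hi) 2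
    if PySem.List.pyGetD a mid 0 < v then bisectLeftLoop a v (mid + 1) hi
    else bisectLeftLoop a v lo mid
  else lo
termination_by (hi - lo).toNat
decreasing_by
  · simp only [PySem.Int.floordiv_eq_ediv_of_pos (by norm_num : (0:Int) < 2)]
    omega
  · simp only [PySem.Int.floordiv_eq_ediv_of_pos (by norm_num : (0:Int) < 2)]
    omega

-- literal port of B: prefix sums of A[:-1], sort, binary-search ceil(total/2),
-- take the best of the two neighbours of the insertion point
def solution_alt (A : List Int) : Int :=
  let total := A.sum
  let pr :=
    (PySem.List.slice A none (some (-1))).foldl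
      (fun (st : List Int × Int) (x : Int) => (st.1 ++ [st.2 + x], st.2 + x)) ([], 0)
  let prefixes := PySem.List.sorted pr.1 (fun x => x) false
  let target := PySem.Int.floordiv (total + 1) 2
  let i := bisectLeftLoop prefixes target 0 (prefixes.length : Int)
  let best : Int := 100000
  let best := if 0 < i then min best (total - 2 * PySem.List.pyGetD prefixes (i - 1) 0) else best
  let best := if i < (prefixes.length : Int) then min best (2 * PySem.List.pyGetD prefixes i 0 - total) else best
  best

-- ===== PRECONDITION & SPEC =====
def Spec_solution (A : List Int) (out : Int) : Prop := out = solution_alt A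
instance (A : List Int) (out : Int) : Decidable (Spec_solution A out) := by unfold Spec_solution; infer_instance

-- ===== CLAIM (what is proved, stated in full; the proofs are below) =====
def Claim_equal_solution : Prop := ∀ (A : List Int), Dom_solution A → Spec_solution A (solution A)

-- ===== LEMMAS AND PROOFS =====

-- prefix-sum list: pvPrefixes s xs = running sums of xs started from s
def pvPrefixes (s : Int) : List Int → List Int
  | [] => []
  | x :: xs => (s + x) :: pvPrefixes (s + x) xs

theorem pvPrefixes_spec (xs : List Int) (s : Int) (acc : List Int) :
    xs.foldl (fun (st : List Int × Int) (x : Int) => (st.1 ++ [st.2 + x], st.2 + x)) (acc, s)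
      = (acc ++ pvPrefixes s xs, s + xs.sum) := by
  induction xs generalizing s acc with
  | nil => simp [pvPrefixes]
  | cons x xs ih => simp [pvPrefixes, ih, List.append_assoc]; ring

-- A's element-wise fold (with right = total - left invariant) is the running min
-- of |2*p - total| over the prefix sums
theorem pvLoop_eq (total : Int) (xs : List Int) (l m : Int) :
    (xs.foldl
      (fun (st : Int × Int × Int) (a : Int) =>
        (st.1 + a, st.2.1 - a,
          if |st.1 + a - (st.2.1 - a)| < st.2.2 then |st.1 + a - (st.2.1 - a)| else st.2.2))
      (l, total - l, m)).2.2
    = (pvPrefixes l xs).foldl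
        (fun (best p : Int) => if |2 * p - total| < best then |2 * p - total| else best) m := by
  induction xs generalizing l m with
  | nil => simp [pvPrefixes]
  | cons x xs ih =>
    simp only [List.foldl, pvPrefixes]
    have h1 : total - l - x = total - (l + x) := by ring
    have h2' : l + x - (total - (l + x)) = 2 * (l + x) - total := by ring
    rw [h1, h2']
    exact ih (l + x) _

-- A as a min-fold over the mapped candidate list
theorem pvA_as_min_fold (P : List Int) (T m : Int) :
    P.foldl (fun (best p : Int) => if |2 * p - T| < best then |2 * p - T| else best) m
      = (P.map (fun p => |2 * p - T|)).foldl min m := by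
  rw [List.foldl_map]
  apply PySem.List.foldl_congr_mem
  intro acc x _
  rcases lt_or_ge (|2 * x - T|) acc with h | h
  · simp [h, min_eq_right h.le]
  · simp [not_lt.mpr h, min_eq_left h]

theorem pv_min_foldl_perm (l1 l2 : List Int) (m : Int) (h : l1.Perm l2) :
    l1.foldl min m = l2.foldl min m := by
  haveI : RightCommutative (min : Int → Int → Int) :=
    ⟨fun b a1 a2 => min_right_comm b a1 a2⟩
  exact h.foldl_eq m

theorem pv_sorted_le (a : List Int) (ha : a.Pairwise (· ≤ ·)) (p q : Nat)
    (hp : p < a.length) (hq : q < a.length) (hpq : p ≤ q) : a[p] ≤ a[q] := by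
  rcases Nat.eq_or_lt_of_le hpq with h | h
  · subst h; exact le_refl _
  · exact List.pairwise_iff_getElem.mp ha p q hp hq h

-- specification of the binary-search port: the returned index splits the sorted
-- list into a strict lower part and an upper part
theorem bisectLeftLoop_spec (a : List Int) (v : Int) (ha : a.Pairwise (· ≤ ·)) :
    ∀ (k : Nat) (lo hi : Int), (hi - lo).toNat = k →
    0 ≤ lo → lo ≤ hi → hi ≤ (a.length : Int) →
    (∀ (j : Nat) (hj : j < a.length), (j : Int) < lo → a[j] < v) →
    (∀ (j : Nat) (hj : j < a.length), hi ≤ (j : Int) → v ≤ a[j]) →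
    ∃ i : Nat, bisectLeftLoop a v lo hi = (i : Int) ∧ i ≤ a.length ∧
      (∀ (j : Nat) (hj : j < a.length), j < i → a[j] < v) ∧
      (∀ (j : Nat) (hj : j < a.length), i ≤ j → v ≤ a[j]) := by
  intro k
  induction k using Nat.strong_induction_on with
  | _ k ih =>
    intro lo hi hk h0 h1 h2 hlo hhi
    rw [bisectLeftLoop]
    by_cases h : lo < hi
    · simp only [h, dif_pos]
      have hdvd : PySem.Int.floordiv (lo + hi) 2 = (lo + hi) / 2 :=
        PySem.Int.floordiv_eq_ediv_of_pos (by norm_num)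
      set mid := PySem.Int.floordiv (lo + hi) 2 with hmid
      have hmlo : lo ≤ mid := by rw [hdvd]; omega
      have hmhi : mid < hi := by rw [hdvd]; omega
      have hmnat : mid.toNat < a.length := by omega
      have hget : PySem.List.pyGetD a mid 0 = a[mid.toNat] :=
        PySem.List.pyGetD_eq_getElem a 0 (by omega) (by exact_mod_cast (by omega : mid < (a.length : Int)))
      by_cases hc : PySem.List.pyGetD a mid 0 < v
      · simp only [hc, if_pos]
        refine ih ((hi - (mid + 1)).toNat) (by omega) (mid + 1) hi (by rfl) (by omega) (by omega) h2 ?_ hhi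
        intro j hj hjlt
        have hjm : (j : Int) ≤ mid := by omega
        have : a[j] ≤ a[mid.toNat] := pv_sorted_le a ha j mid.toNat hj hmnat (by omega)
        rw [hget] at hc; omega
      · simp only [hc, if_neg, not_false_iff]
        refine ih ((mid - lo).toNat) (by omega) lo mid (by rfl) h0 (by omega) (by omega) hlo ?_
        intro j hj hjge
        have : a[mid.toNat] ≤ a[j] := pv_sorted_le a ha mid.toNat j hmnat hj (by omega)
        rw [hget] at hc; omega
    · simp only [h, dif_neg, not_false_iff]
      have : hi = lo := by omega
      refine ⟨lo.toNat, by omega, by omega, ?_, ?_⟩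
      · intro j hj hjlt; exact hlo j hj (by omega)
      · intro j hj hjge; exact hhi j hj (by omega)

-- the min of |2*p - T| over a sorted list is attained at a neighbour of the split point
theorem pv_min_split (S : List Int) (T m : Int) (hs : S.Pairwise (· ≤ ·)) (i : Nat)
    (hi : i ≤ S.length)
    (hlt : ∀ (j : Nat) (hj : j < S.length), j < i → 2 * S[j] < T)
    (hge : ∀ (j : Nat) (hj : j < S.length), i ≤ j → T ≤ 2 * S[j]) :
    (S.map (fun p => |2 * p - T|)).foldl min m
      = (if (i : Int) < (S.length : Int)
          then min (if 0 < (i : Int) then min m (T - 2 * PySem.List.pyGetD S ((i : Int) - 1) 0) else m)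
                   (2 * PySem.List.pyGetD S (i : Int) 0 - T)
          else (if 0 < (i : Int) then min m (T - 2 * PySem.List.pyGetD S ((i : Int) - 1) 0) else m)) := by
  have hsorted := List.pairwise_iff_getElem.mp hs
  have hfl := PySem.List.foldl_min_le (S.map (fun p => |2 * p - T|)) m
  -- facts about the two neighbour getElems when they exist
  have hget1 : 0 < i → PySem.List.pyGetD S ((i : Int) - 1) 0 = S.getD (i - 1) 0 := by
    intro hpos
    have : ((i : Int) - 1) = ((i - 1 : Nat) : Int) := by omega
    rw [this, PySem.List.pyGetD_natCast]
  have hget2 : i < S.length → PySem.List.pyGetD S (i : Int) 0 = S.getD i 0 := by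
    intro _; rw [PySem.List.pyGetD_natCast]
  apply le_antisymm
  · -- foldl min ≤ RHS: every compared item is ≥ the fold
    have hm : (S.map (fun p => |2 * p - T|)).foldl min m ≤ m := hfl.1
    have hmem : ∀ (j : Nat) (hj : j < S.length),
        (S.map (fun p => |2 * p - T|)).foldl min m ≤ |2 * S[j] - T| := by
      intro j hj
      exact hfl.2 _ (List.mem_map.mpr ⟨S[j], List.getElem_mem hj, rfl⟩)
    split_ifs with h1 h2 h3
    · -- i < len, 0 < i
      have hj1 : i - 1 < S.length := by omega
      have hv1 := hmem (i - 1) hj1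
      have hv2 := hmem i (by omega)
      have ha1 : |2 * S[i-1] - T| = T - 2 * S[i-1] := by
        have := hlt (i - 1) hj1 (by omega); rw [abs_of_nonpos (by omega)]; ring
      have ha2 : |2 * S[i]'(by omega) - T| = 2 * S[i]'(by omega) - T := by
        have := hge i (by omega) (le_refl i); rw [abs_of_nonneg (by omega)]
      rw [hget1 (by omega), List.getD_eq_getElem S 0 hj1, hget2 (by omega), List.getD_eq_getElem S 0 (by omega)]
      rw [ha1] at hv1; rw [ha2] at hv2
      omega
    · -- i < len, i = 0
      have hv2 := hmem i (by omega)
      have ha2 : |2 * S[i]'(by omega) - T| = 2 * S[i]'(by omega) - T := by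
        have := hge i (by omega) (le_refl i); rw [abs_of_nonneg (by omega)]
      rw [hget2 (by omega), List.getD_eq_getElem S 0 (by omega)]
      rw [ha2] at hv2
      omega
    · -- i = len, 0 < i
      have hj1 : i - 1 < S.length := by omega
      have hv1 := hmem (i - 1) hj1
      have ha1 : |2 * S[i-1] - T| = T - 2 * S[i-1] := by
        have := hlt (i - 1) hj1 (by omega); rw [abs_of_nonpos (by omega)]; ring
      rw [hget1 (by omega), List.getD_eq_getElem S 0 hj1]
      rw [ha1] at hv1
      omega
    · exact hm
  · -- RHS ≤ foldl min: RHS is ≤ m and ≤ every mapped element, and the fold is one of those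
    have hrle : ∀ (j : Nat) (hj : j < S.length),
        (if (i : Int) < (S.length : Int)
          then min (if 0 < (i : Int) then min m (T - 2 * PySem.List.pyGetD S ((i : Int) - 1) 0) else m)
                   (2 * PySem.List.pyGetD S (i : Int) 0 - T)
          else (if 0 < (i : Int) then min m (T - 2 * PySem.List.pyGetD S ((i : Int) - 1) 0) else m))
          ≤ |2 * S[j] - T| := by
      intro j hj
      by_cases hji : j < i
      · -- lower part: a[j] ≤ a[i-1], |…| = T - 2 a[j] ≥ T - 2 a[i-1]
        have hpos : 0 < i := by omega
        have hj1 : i - 1 < S.length := by omega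
        have hle : S[j] ≤ S[i-1] := pv_sorted_le S hs j (i-1) hj hj1 (by omega)
        have habs : |2 * S[j] - T| = T - 2 * S[j] := by
          have := hlt j hj hji; rw [abs_of_nonpos (by omega)]; ring
        rw [habs, hget1 hpos, List.getD_eq_getElem S 0 hj1]
        split_ifs <;> simp_all <;> omega
      · -- upper part: a[i] ≤ a[j], |…| = 2 a[j] - T ≥ 2 a[i] - T
        have hilen : i < S.length := by omega
        have hle : S[i]'hilen ≤ S[j] := pv_sorted_le S hs i j hilen hj (by omega)
        have habs : |2 * S[j] - T| = 2 * S[j] - T := by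
          have := hge j hj (by omega); rw [abs_of_nonneg (by omega)]
        rw [habs, hget2 hilen, List.getD_eq_getElem S 0 hilen]
        split_ifs <;> simp_all <;> omega
    have hrm : (if (i : Int) < (S.length : Int)
          then min (if 0 < (i : Int) then min m (T - 2 * PySem.List.pyGetD S ((i : Int) - 1) 0) else m)
                   (2 * PySem.List.pyGetD S (i : Int) 0 - T)
          else (if 0 < (i : Int) then min m (T - 2 * PySem.List.pyGetD S ((i : Int) - 1) 0) else m)) ≤ m := by
      split_ifs <;> simp [min_le_iff]
    rcases PySem.List.foldl_min_mem (S.map (fun p => |2 * p - T|)) m with hcase | hcase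
    · rw [hcase]; exact hrm
    · rcases List.mem_map.mp hcase with ⟨x, hx, hfx⟩
      rcases List.mem_iff_getElem.mp hx with ⟨j, hj, hjx⟩
      rw [← hfx, ← hjx]
      exact hrle j hj

theorem solution_eq_alt (A : List Int) : solution A = solution_alt A := by
  unfold solution solution_alt
  simp only [pvPrefixes_spec A.dropLast 0 [], PySem.List.slice_to_neg_one, List.nil_append, zero_add]
  -- rewrite A's indexed loop into a fold over the elements of A.dropLast
  have hiter :
      (PySem.List.pyRange 0 ((A.length : Int) - 1) 1).foldl
        (fun (st : Int × Int × Int) (i : Int) =>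
          let a := PySem.List.pyGetD A i 0
          let left := st.1 + a
          let right := st.2.1 - a
          let summed := |left - right|
          (left, right, if summed < st.2.2 then summed else st.2.2))
        (0, A.sum, 100000)
      = A.dropLast.foldl
        (fun (st : Int × Int × Int) (a : Int) =>
          (st.1 + a, st.2.1 - a,
            if |st.1 + a - (st.2.1 - a)| < st.2.2 then |st.1 + a - (st.2.1 - a)| else st.2.2))
        (0, A.sum, 100000) := by
    cases A with
    | nil => simp [PySem.List.pyRange_one_eq_nil]
    | cons y ys =>
      have hlen : ((y :: ys).length : Int) - 1 = ((y :: ys).dropLast.length : Int) := by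
        simp [List.length_dropLast]
      rw [hlen]
      have hcong :
          (PySem.List.pyRange 0 (((y :: ys).dropLast.length : Int)) 1).foldl
            (fun (st : Int × Int × Int) (i : Int) =>
              let a := PySem.List.pyGetD (y :: ys) i 0
              let left := st.1 + a
              let right := st.2.1 - a
              let summed := |left - right|
              (left, right, if summed < st.2.2 then summed else st.2.2))
            (0, (y :: ys).sum, 100000)
          = (PySem.List.pyRange 0 (((y :: ys).dropLast.length : Int)) 1).foldl
            (fun (st : Int × Int × Int) (i : Int) =>
              let a := PySem.List.pyGetD (y :: ys).dropLast i 0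
              let left := st.1 + a
              let right := st.2.1 - a
              let summed := |left - right|
              (left, right, if summed < st.2.2 then summed else st.2.2))
            (0, (y :: ys).sum, 100000) := by
        apply PySem.List.foldl_congr_mem
        intro st i hi
        have hmem := (PySem.List.mem_pyRange_one).mp hi
        have h0 : 0 ≤ i := hmem.1
        have h1 : i < ((y :: ys).dropLast.length : Int) := hmem.2
        have hget : PySem.List.pyGetD (y :: ys) i 0 = PySem.List.pyGetD (y :: ys).dropLast i 0 := by
          rw [PySem.List.pyGetD_eq_getElem (y :: ys) 0 (by omega) (by
            have h := List.length_dropLast (xs := (y :: ys)); omega),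
            PySem.List.pyGetD_eq_getElem (y :: ys).dropLast 0 (by omega) (by omega)]
          rw [List.getElem_dropLast]
        simp only [hget]
      rw [hcong]
      exact PySem.List.foldl_pyRange_zero_pyGetD' (y :: ys).dropLast 0
        (fun st a =>
          (st.1 + a, st.2.1 - a,
            if |st.1 + a - (st.2.1 - a)| < st.2.2 then |st.1 + a - (st.2.1 - a)| else st.2.2))
        (0, (y :: ys).sum, 100000)
  rw [hiter]
  -- turn A's side into a min-fold over the candidate list of prefixes
  have hA := pvLoop_eq A.sum A.dropLast 0 100000
  simp only [sub_zero] at hA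
  rw [hA, pvA_as_min_fold]
  -- name the sorted prefix list and its split point
  set P := pvPrefixes 0 A.dropLast with hP
  set S := PySem.List.sorted P (fun x => x) false with hS
  have hperm : S.Perm P := PySem.List.sorted_perm P (fun x => x) false
  have hpair : S.Pairwise (· ≤ ·) := by
    have := PySem.List.sorted_pairwise P (fun x => x)
    simpa using this
  set T := A.sum with hT
  have htgt : PySem.Int.floordiv (T + 1) 2 = (T + 1) / 2 :=
    PySem.Int.floordiv_eq_ediv_of_pos (by norm_num)
  obtain ⟨i, hieq, hile, hilt, hige⟩ :=
    bisectLeftLoop_spec S (PySem.Int.floordiv (T + 1) 2) hpair ((S.length : Int) - 0).toNat 0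
      (S.length : Int) rfl (by omega) (by omega) (by omega)
      (by intro j hj hjlt; omega) (by intro j hj hjge; omega)
  -- translate the bisect bounds on S[j] vs ceil((T+1)/2) into bounds on 2*S[j] vs T
  have hilt' : ∀ (j : Nat) (hj : j < S.length), j < i → 2 * S[j] < T := by
    intro j hj hji; have := hilt j hj hji; rw [htgt] at this; omega
  have hige' : ∀ (j : Nat) (hj : j < S.length), i ≤ j → T ≤ 2 * S[j] := by
    intro j hj hji; have := hige j hj hji; rw [htgt] at this; omega
  -- replace the min-fold over P by the min-fold over S (perm invariance), then split
  rw [pv_min_foldl_perm (P.map (fun p => |2 * p - T|)) (S.map (fun p => |2 * p - T|)) 100000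
      (hperm.map _).symm]
  rw [pv_min_split S T 100000 hpair i hile hilt' hige']
  rw [hieq]

-- ===== VERDICT (by name: the statement is the Claim_ definition above) =====
theorem solution_spec : Claim_equal_solution := by
  intro A _
  unfold Spec_solution
  exact solution_eq_alt A
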